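-- pv_equiv track=rewrite | github.com/KateLy1/RK2 | sem1_task3.py | feedAnimals2
-- ===== SOURCE A (Python) =====
-- def feedAnimals2(animals, food):
--     if len(animals) == 0 or len(food) == 0:
--         return 0
--     animals.sort()
--     food.sort()
--     count = 0
--     for f in food:
--         if f >= animals[count]:
--             count += 1
--         if count == len(animals):
--             break
--     return count
-- ===== SOURCE B (Python) =====
-- def feedAnimals2(animals, food):
--     if len(animals) == 0 or len(food) == 0:
--         return 0
--     animals.sort()
--     food.sort()
--
--     def ok(k):
--         # feasibility: the k smallest animals can all be fed iff each fits
--         # under one of the k largest foods, matched in order (exchange argument)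
--         return all(animals[i] <= food[len(food) - k + i] for i in range(k))
--
--     # binary search for the largest feasible k (ok is downward closed)
--     lo, hi = 0, min(len(animals), len(food))
--     while lo < hi:
--         mid = (lo + hi + 1) // 2
--         if ok(mid):
--             lo = mid
--         else:
--             hi = mid - 1
--     return lo
-- ===== Notes on version B (the rewrite author's own statement) =====
-- stated objective: alternative
-- what changed: A counts by a greedy single pass over the sorted food indexing animals by the fed count; B instead binary-searches for the largest k such that the k smallest animals fit pointwise under the k largest foods (a feasibility test per k), which equals the greedy count by an exchange argument.
import Mathlib
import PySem

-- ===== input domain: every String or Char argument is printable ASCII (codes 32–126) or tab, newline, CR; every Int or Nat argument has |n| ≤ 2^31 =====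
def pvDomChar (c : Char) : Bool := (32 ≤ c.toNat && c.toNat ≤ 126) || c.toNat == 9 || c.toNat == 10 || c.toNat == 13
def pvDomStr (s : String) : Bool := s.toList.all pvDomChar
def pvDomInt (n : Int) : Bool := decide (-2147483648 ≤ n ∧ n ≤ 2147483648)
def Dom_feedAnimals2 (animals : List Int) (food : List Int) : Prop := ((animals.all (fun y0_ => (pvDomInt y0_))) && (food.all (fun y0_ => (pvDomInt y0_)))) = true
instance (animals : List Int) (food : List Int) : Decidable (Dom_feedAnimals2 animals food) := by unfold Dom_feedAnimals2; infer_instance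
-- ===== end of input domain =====

-- B replaces A's greedy single pass over the sorted food with a feasibility test
-- ("the k smallest animals fit under the k largest foods") binary-searched for the
-- largest feasible k.  Both Pythons sort their argument lists in place; the
-- equivalence proved is about the return value.

-- ===== PORT A =====
-- A's for-loop over the sorted food with the `count` index into sorted animals and the break.
-- animals[count] is ported as getD; the proof maintains count < animals.length, where Python never raises.
def feedA_loop (sa : List Int) (foods : List Int) (c : Nat) : Nat :=
  match foods with
  | [] => c
  | f :: fs =>
    let c' := if sa.getD c 0 ≤ f then c + 1 else c
    if c' = sa.length then c' else feedA_loop sa fs c'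

def feedAnimals2 (animals : List Int) (food : List Int) : Int :=
  if animals.length = 0 ∨ food.length = 0 then 0
  else
    let sa := PySem.List.sorted animals (fun x => x) false
    let sf := PySem.List.sorted food (fun x => x) false
    (feedA_loop sa sf 0 : Int)

-- ===== PORT B =====
-- B's ok(k): all(animals[i] <= food[len(food)-k+i] for i in range(k)); binary search calls
-- it only with k ≤ min(len(animals), len(food)), where every index is in range (getD exact there).
def okB (sa sf : List Int) (k : Nat) : Bool :=
  (List.range k).all (fun i => decide (sa.getD i 0 ≤ sf.getD (sf.length - k + i) 0))

-- B's `while lo < hi` binary search; mid = (lo+hi+1)//2 on the nonnegative ints is Nat division.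
-- `fuel` only makes the loop structural: hi - lo shrinks every pass, so fuel = hi - lo at entry
-- is an iteration bound and the 0-fuel arm is never reached (the proof carries hi - lo ≤ fuel).
def bsearchB (sa sf : List Int) : Nat → Nat → Nat → Nat
  | 0, lo, _ => lo
  | fuel + 1, lo, hi =>
    if lo < hi then
      if okB sa sf ((lo + hi + 1) / 2) then bsearchB sa sf fuel ((lo + hi + 1) / 2) hi
      else bsearchB sa sf fuel lo ((lo + hi + 1) / 2 - 1)
    else lo

def feedAnimals2_alt (animals : List Int) (food : List Int) : Int :=
  if animals.length = 0 ∨ food.length = 0 then 0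
  else
    let sa := PySem.List.sorted animals (fun x => x) false
    let sf := PySem.List.sorted food (fun x => x) false
    (bsearchB sa sf (min sa.length sf.length) 0 (min sa.length sf.length) : Int)

-- ===== PRECONDITION & SPEC =====
def Spec_feedAnimals2 (animals : List Int) (food : List Int) (out : Int) : Prop := out = feedAnimals2_alt animals food
instance (animals : List Int) (food : List Int) (out : Int) : Decidable (Spec_feedAnimals2 animals food out) := by unfold Spec_feedAnimals2; infer_instance

-- ===== CLAIM (what is proved, stated in full; the proofs are below) =====
def Claim_equal_feedAnimals2 : Prop := ∀ (animals : List Int) (food : List Int), Dom_feedAnimals2 animals food → Spec_feedAnimals2 animals food (feedAnimals2 animals food)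

-- ===== LEMMAS AND PROOFS =====

-- reference greedy matcher A's loop is reduced to
def mgreedy : List Int → List Int → Nat
  | [], _ => 0
  | _ :: _, [] => 0
  | a :: as, f :: fs => if a ≤ f then mgreedy as fs + 1 else mgreedy (a :: as) fs

theorem mgreedy_nil_right (xs : List Int) : mgreedy xs [] = 0 := by
  cases xs <;> rfl

theorem feedA_loop_eq (sa : List Int) (foods : List Int) :
    ∀ c, c < sa.length → feedA_loop sa foods c = c + mgreedy (sa.drop c) foods := by
  induction foods with
  | nil => intro c hc; simp [feedA_loop, mgreedy_nil_right]
  | cons f fs ih =>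
    intro c hc
    have hdrop : sa.drop c = sa[c] :: sa.drop (c + 1) := List.drop_eq_getElem_cons hc
    have hgetD : sa.getD c 0 = sa[c] := List.getD_eq_getElem sa 0 hc
    by_cases hle : sa[c] ≤ f
    · by_cases hend : c + 1 = sa.length
      · have hdrop1 : sa.drop (c + 1) = [] := by
          rw [List.drop_eq_nil_iff]; omega
        simp only [feedA_loop, hgetD, if_pos hle, if_pos hend, hdrop, hdrop1, mgreedy]
      · have hlt : c + 1 < sa.length := by omega
        simp only [feedA_loop, hgetD, if_pos hle, if_neg hend]
        rw [ih (c + 1) hlt, hdrop]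
        simp [mgreedy, hle]; omega
    · have hne : c ≠ sa.length := by omega
      simp only [feedA_loop, hgetD, if_neg hle, if_neg hne]
      rw [ih c hc, hdrop]
      simp [mgreedy, hle, ← hdrop]

-- feasibility: the k smallest animals fit, in order, under the k largest foods
def Ok (sa sf : List Int) (k : Nat) : Prop :=
  k ≤ sa.length ∧ k ≤ sf.length ∧
    List.Forall₂ (· ≤ ·) (sa.take k) (sf.drop (sf.length - k))

theorem mgreedy_le (sf : List Int) : ∀ sa : List Int,
    mgreedy sa sf ≤ sa.length ∧ mgreedy sa sf ≤ sf.length := by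
  induction sf with
  | nil => intro sa; simp [mgreedy_nil_right]
  | cons f fs ih =>
    intro sa
    cases sa with
    | nil => simp [mgreedy]
    | cons a as =>
      by_cases h : a ≤ f
      · have := ih as
        simp only [mgreedy, if_pos h, List.length_cons]; omega
      · have := ih (a :: as)
        simp only [mgreedy, if_neg h, List.length_cons] at *; omega

theorem greedy_ok (sf : List Int) (hs : sf.Pairwise (· ≤ ·)) :
    ∀ sa : List Int, Ok sa sf (mgreedy sa sf) := by
  induction sf with
  | nil => intro sa; simp [Ok, mgreedy_nil_right]
  | cons f fs ih =>
    intro sa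
    obtain ⟨hf, hfs⟩ := List.pairwise_cons.mp hs
    cases sa with
    | nil => exact ⟨by simp [mgreedy], by simp [mgreedy], by simp [mgreedy]⟩
    | cons a as =>
      by_cases h : a ≤ f
      · obtain ⟨h1, h2, h3⟩ := ih hfs as
        refine ⟨?_, ?_, ?_⟩
        · simp only [mgreedy, if_pos h, List.length_cons]; omega
        · simp only [mgreedy, if_pos h, List.length_cons]; omega
        · simp only [mgreedy, if_pos h, List.length_cons, List.take_succ_cons,
            Nat.succ_sub_succ]
          rcases Nat.lt_or_ge (mgreedy as fs) fs.length with hlt | hge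
          · obtain ⟨q, hq⟩ : ∃ q, fs.length - mgreedy as fs = q + 1 :=
              ⟨fs.length - mgreedy as fs - 1, by omega⟩
            have hidx : q < fs.length := by omega
            rw [hq] at h3 ⊢
            rw [List.drop_succ_cons, List.drop_eq_getElem_cons hidx]
            exact List.Forall₂.cons (le_trans h (hf _ (List.getElem_mem hidx))) h3
          · have hgeq : mgreedy as fs = fs.length := by omega
            have e0 : fs.length - mgreedy as fs = 0 := by omega
            rw [e0, List.drop_zero]
            rw [e0, List.drop_zero] at h3
            exact List.Forall₂.cons h h3
      · obtain ⟨h1, h2, h3⟩ := ih hfs (a :: as)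
        refine ⟨?_, ?_, ?_⟩
        · simpa only [mgreedy, if_neg h] using h1
        · simp only [mgreedy, if_neg h, List.length_cons]; omega
        · simp only [mgreedy, if_neg h, List.length_cons]
          have : fs.length + 1 - mgreedy (a :: as) fs =
              (fs.length - mgreedy (a :: as) fs) + 1 := by omega
          rw [this, List.drop_succ_cons]
          exact h3

theorem greedy_max (sf : List Int) : ∀ (sa : List Int) (k : Nat),
    Ok sa sf k → k ≤ mgreedy sa sf := by
  induction sf with
  | nil =>
    intro sa k hk
    have h := hk.2.1; simp at h
    simp [mgreedy_nil_right, h]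
  | cons f fs ih =>
    intro sa k hk
    cases sa with
    | nil =>
      have h := hk.1; simp at h
      simp [mgreedy, h]
    | cons a as =>
      obtain ⟨hk1, hk2, h3⟩ := hk
      cases k with
      | zero => exact Nat.zero_le _
      | succ j =>
        simp only [List.length_cons, Nat.succ_sub_succ, List.take_succ_cons] at hk1 hk2 h3
        by_cases h : a ≤ f
        · simp only [mgreedy, if_pos h, Nat.succ_le_succ_iff]
          apply ih as j
          refine ⟨by omega, by omega, ?_⟩
          rcases Nat.lt_or_ge j fs.length with hlt | hge
          · obtain ⟨q, hq⟩ : ∃ q, fs.length - j = q + 1 := ⟨fs.length - j - 1, by omega⟩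
            have hidx : q < fs.length := by omega
            rw [hq, List.drop_succ_cons, List.drop_eq_getElem_cons hidx] at h3
            rw [show fs.length - j = q + 1 from hq]
            exact (List.forall₂_cons.mp h3).2
          · have e0 : fs.length - j = 0 := by omega
            rw [e0, List.drop_zero] at h3
            rw [e0, List.drop_zero]
            exact (List.forall₂_cons.mp h3).2
        · have hjm : j + 1 ≤ fs.length := by
            by_contra hc
            have hj : j = fs.length := by omega
            rw [hj, Nat.sub_self, List.drop_zero] at h3
            exact h (List.forall₂_cons.mp h3).1
          simp only [mgreedy, if_neg h]
          apply ih (a :: as) (j + 1)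
          refine ⟨by simpa using hk1, hjm, ?_⟩
          have e1 : (f :: fs).drop (fs.length - j) = fs.drop (fs.length - (j + 1)) := by
            have : fs.length - j = (fs.length - (j + 1)) + 1 := by omega
            rw [this, List.drop_succ_cons]
          rw [e1] at h3
          simpa using h3

-- index characterisation of the Forall₂ in Ok
theorem ok_index (sa sf : List Int) (k : Nat) (hk1 : k ≤ sa.length) (hk2 : k ≤ sf.length) :
    (List.Forall₂ (· ≤ ·) (sa.take k) (sf.drop (sf.length - k)) ↔
      ∀ i < k, sa.getD i 0 ≤ sf.getD (sf.length - k + i) 0) := by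
  rw [List.forall₂_iff_get]
  constructor
  · rintro ⟨hlen, hget⟩ i hi
    have h1 : i < (sa.take k).length := by simp; omega
    have h2 : i < (sf.drop (sf.length - k)).length := by simp; omega
    have := hget i h1 h2
    simp only [List.get_eq_getElem, List.getElem_take, List.getElem_drop] at this
    rwa [List.getD_eq_getElem sa 0 (by omega), List.getD_eq_getElem sf 0 (by omega)]
  · intro hall
    refine ⟨by simp; omega, ?_⟩
    intro i h1 h2
    simp only [List.length_take] at h1
    have hik : i < k := by omega
    have := hall i hik
    rw [List.getD_eq_getElem sa 0 (by omega), List.getD_eq_getElem sf 0 (by omega)] at this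
    simpa [List.get_eq_getElem, List.getElem_take, List.getElem_drop] using this

theorem Ok_mono (sa sf : List Int) (hs : sf.Pairwise (· ≤ ·)) (j k : Nat)
    (hjk : j ≤ k) (hk : Ok sa sf k) : Ok sa sf j := by
  obtain ⟨hk1, hk2, h3⟩ := hk
  refine ⟨by omega, by omega, ?_⟩
  rw [ok_index sa sf k hk1 hk2] at h3
  rw [ok_index sa sf j (by omega) (by omega)]
  intro i hi
  have h := h3 i (by omega)
  refine le_trans h ?_
  have hp := List.pairwise_iff_getElem.mp hs
  have hb1 : sf.length - k + i < sf.length := by omega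
  have hb2 : sf.length - j + i < sf.length := by omega
  rcases Nat.lt_or_ge (sf.length - k + i) (sf.length - j + i) with hlt | hge
  · rw [List.getD_eq_getElem sf 0 hb1, List.getD_eq_getElem sf 0 hb2]
    exact hp _ _ hb1 hb2 hlt
  · have heq : sf.length - k + i = sf.length - j + i := by omega
    rw [heq]

theorem okB_iff (sa sf : List Int) (k : Nat) (hk1 : k ≤ sa.length) (hk2 : k ≤ sf.length) :
    (okB sa sf k = true ↔ Ok sa sf k) := by
  unfold okB Ok
  rw [List.all_eq_true]
  constructor
  · intro h
    refine ⟨hk1, hk2, ?_⟩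
    rw [ok_index sa sf k hk1 hk2]
    intro i hi
    have := h i (List.mem_range.mpr hi)
    exact of_decide_eq_true this
  · rintro ⟨-, -, h3⟩ i hi
    rw [ok_index sa sf k hk1 hk2] at h3
    exact decide_eq_true (h3 i (List.mem_range.mp hi))

theorem bsearchB_eq (sa sf : List Int) (g : Nat)
    (hup : ∀ k, k ≤ min sa.length sf.length → okB sa sf k = true → k ≤ g)
    (hdown : ∀ k, k ≤ g → okB sa sf k = true) :
    ∀ fuel lo hi, hi - lo ≤ fuel → lo ≤ g → g ≤ hi → hi ≤ min sa.length sf.length →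
      bsearchB sa sf fuel lo hi = g := by
  intro fuel
  induction fuel with
  | zero => intro lo hi hfu hlo hhi hcap; simp only [bsearchB]; omega
  | succ fuel ih =>
    intro lo hi hfu hlo hhi hcap
    rw [bsearchB]
    by_cases h : lo < hi
    · rw [if_pos h]
      by_cases hok : okB sa sf ((lo + hi + 1) / 2) = true
      · rw [if_pos hok]
        have hmid : (lo + hi + 1) / 2 ≤ g := hup _ (by omega) hok
        exact ih _ _ (by omega) hmid hhi hcap
      · rw [if_neg hok]
        have hmid : g < (lo + hi + 1) / 2 := by
          by_contra hc
          exact hok (hdown _ (by omega))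
        exact ih _ _ (by omega) hlo (by omega) (by omega)
    · rw [if_neg h]; omega

-- ===== VERDICT (by name: the statement is the Claim_ definition above) =====
theorem feedAnimals2_spec : Claim_equal_feedAnimals2 := by
  intro animals food _
  unfold Spec_feedAnimals2 feedAnimals2 feedAnimals2_alt
  by_cases ha : animals = []
  · simp [ha]
  · by_cases hf : food = []
    · simp [hf]
    · have hg : ¬ (animals.length = 0 ∨ food.length = 0) := by
        simp [List.length_eq_zero_iff, ha, hf]
      simp only [if_neg hg]
      set sa := PySem.List.sorted animals (fun x => x) false with hsa
      set sf := PySem.List.sorted food (fun x => x) false with hsf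
      have hpair : sf.Pairwise (· ≤ ·) := by
        have := PySem.List.sorted_pairwise (xs := food) (key := fun x => x)
        simpa [hsf] using this
      have hlen : sa.length = animals.length := PySem.List.length_sorted ..
      have h0 : 0 < sa.length := by
        rw [hlen]; exact List.length_pos_of_ne_nil ha
      set g := mgreedy sa sf with hgdef
      have hgle := mgreedy_le sf sa
      have hok : Ok sa sf g := greedy_ok sf hpair sa
      rw [feedA_loop_eq sa sf 0 h0]
      rw [bsearchB_eq sa sf g
        (fun k hk hb => greedy_max sf sa k ((okB_iff sa sf k (by omega) (by omega)).mp hb))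
        (fun k hk => (okB_iff sa sf k (by omega) (by omega)).mpr
          (Ok_mono sa sf hpair k g hk hok))
        (min sa.length sf.length) 0 (min sa.length sf.length)
        (by omega) (by omega) (by omega) (by omega)]
      simp [hgdef]
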